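-- pv_equiv track=rewrite | github.com/awmaxwell144/FoundIT_VLM | utils/helpers.py | state_to_string
-- ===== SOURCE A (Python) =====
-- def state_to_string (states):
--     duration = len(states)
--     counter = 0
--     if (duration <= 15): spread = 2
--     elif (duration < 50): spread = 5
--     else: spread = 10
--
--     final_state = ""
--     output = f'\nEvery {spread} state sequence(s): \n\n'
--     for i in range(duration):
--         if (i % spread == 0):
--             for var, val in states[i].items():
--                 output+= f'{var}: {val} \n'
--             output+="\n"
--         if (i == (duration - 1)):
--             for var, val in states[i].items():
--                 final_state+= f'{var}: {val} \n'
--             final_state+="\n"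
--
--         counter+=1
--
--     return output, final_state
-- ===== SOURCE B (Python) =====
-- def state_to_string(states):
--     n = len(states)
--     spread = 2 if n <= 15 else (5 if n < 50 else 10)
--
--     def fmt(state):
--         return ''.join(f'{var}: {val} \n' for var, val in state.items()) + '\n'
--
--     output = f'\nEvery {spread} state sequence(s): \n\n' + ''.join(fmt(s) for s in states[::spread])
--     final_state = fmt(states[-1]) if states else ''
--     return output, final_state
-- ===== Notes on version B (the rewrite author's own statement) =====
-- stated objective: simpler
-- what changed: Replaces the single indexed loop with its modulo test, duplicated item-formatting code and dead counter by a slice states[::spread] joined through one fmt helper, computing final_state directly from states[-1].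
import Mathlib
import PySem

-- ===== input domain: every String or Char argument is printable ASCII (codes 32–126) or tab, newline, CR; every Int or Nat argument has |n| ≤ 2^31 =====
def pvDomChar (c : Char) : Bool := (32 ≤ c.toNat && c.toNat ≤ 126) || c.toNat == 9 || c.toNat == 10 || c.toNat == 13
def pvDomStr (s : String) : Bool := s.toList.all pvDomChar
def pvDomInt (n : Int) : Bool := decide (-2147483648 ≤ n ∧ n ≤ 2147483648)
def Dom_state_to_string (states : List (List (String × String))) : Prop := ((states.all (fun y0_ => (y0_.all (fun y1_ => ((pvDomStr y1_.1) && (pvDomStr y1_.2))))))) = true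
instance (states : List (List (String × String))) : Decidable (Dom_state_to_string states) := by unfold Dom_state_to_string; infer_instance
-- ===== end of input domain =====

-- B replaces A's single indexed loop (modulo test, duplicated formatting code, dead counter)
-- by one fmt helper applied to the slice states[::spread] and to states[-1]: simpler decomposition.


-- the f-string f'{var}: {val} \n' (identical in A and B)
def pvItemLine (p : String × String) : List Char :=
  p.1.toList ++ [':', ' '] ++ p.2.toList ++ [' ', '\n']

-- the f-string f'\nEvery {spread} state sequence(s): \n\n' (identical in A and B)
def pvHeader (spread : Int) : List Char :=
  '\n' :: "Every ".toList ++ PySem.Int.toChars spread ++ " state sequence(s): \n\n".toList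

-- ===== PORT A =====
def state_to_string (states : List (List (String × String))) : String × String :=
  let duration : Int := states.length
  let spread : Int := if duration ≤ 15 then 2 else if duration < 50 then 5 else 10
  -- state of the loop: (output, final_state, counter); output starts at the header
  let res := (PySem.List.pyRange 0 duration 1).foldl (fun acc i =>
      let out := if PySem.Int.mod i spread = 0 then
          ((PySem.List.pyGetD states i []).foldl (fun o p => o ++ pvItemLine p) acc.1) ++ ['\n']
        else acc.1
      let fin := if i = duration - 1 then
          ((PySem.List.pyGetD states i []).foldl (fun f p => f ++ pvItemLine p) acc.2.1) ++ ['\n']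
        else acc.2.1
      (out, fin, acc.2.2 + 1)) (pvHeader spread, ([] : List Char), (0 : Int))
  (String.ofList res.1, String.ofList res.2.1)

-- ===== PORT B =====
-- fmt(state) = ''.join(f'{var}: {val} \n' for var, val in state.items()) + '\n'
def pvFmt (st : List (String × String)) : List Char :=
  (st.map pvItemLine).flatten ++ ['\n']

def state_to_string_alt (states : List (List (String × String))) : String × String :=
  let n : Int := states.length
  let spread : Int := if n ≤ 15 then 2 else if n < 50 then 5 else 10
  let sampled := (PySem.List.slice? states none none spread).getD []  -- states[::spread]; spread > 0, never none
  let output := pvHeader spread ++ (sampled.map pvFmt).flatten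
  let final : List Char := match states.getLast? with   -- fmt(states[-1]) if states else ''
    | some st => pvFmt st
    | none => []
  (String.ofList output, String.ofList final)

-- ===== PRECONDITION & SPEC =====
def Spec_state_to_string (states : List (List (String × String))) (out : String × String) : Prop := out = state_to_string_alt states
instance (states : List (List (String × String))) (out : String × String) : Decidable (Spec_state_to_string states out) := by unfold Spec_state_to_string; infer_instance

-- ===== CLAIM (what is proved, stated in full; the proofs are below) =====
def Claim_equal_state_to_string : Prop := ∀ (states : List (List (String × String))), Dom_state_to_string states → Spec_state_to_string states (state_to_string states)

-- ===== LEMMAS AND PROOFS =====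

-- A's loop, split into its three independent components:
-- output collects fmt of the states at indices with i % s == 0, final_state those with i == d-1
theorem pv_loopA (states : List (List (String × String))) (s d : Int) (l : List Int)
    (o f : List Char) (c : Int) :
    l.foldl (fun acc i =>
      let out := if PySem.Int.mod i s = 0 then
          ((PySem.List.pyGetD states i []).foldl (fun o p => o ++ pvItemLine p) acc.1) ++ ['\n']
        else acc.1
      let fin := if i = d - 1 then
          ((PySem.List.pyGetD states i []).foldl (fun f p => f ++ pvItemLine p) acc.2.1) ++ ['\n']
        else acc.2.1
      (out, fin, acc.2.2 + 1)) (o, f, c)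
    = (o ++ (l.filter (fun i => decide (PySem.Int.mod i s = 0))).flatMap
          (fun i => pvFmt (PySem.List.pyGetD states i [])),
       f ++ (l.filter (fun i => decide (i = d - 1))).flatMap
          (fun i => pvFmt (PySem.List.pyGetD states i [])),
       c + l.length) := by
  induction l generalizing o f c with
  | nil => simp
  | cons x xs ih =>
    simp only [List.foldl_cons, List.filter_cons, List.length_cons]
    rw [ih]
    simp only [PySem.List.foldl_append_eq_flatMap, pvFmt, ← List.flatMap_def]
    by_cases h2 : x = d - 1
    · subst h2
      by_cases h1 : PySem.Int.mod (d - 1) s = 0 <;> simp [h1, List.append_assoc] <;> omega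
    · by_cases h1 : PySem.Int.mod x s = 0 <;> simp [h1, h2, List.append_assoc] <;> omega

-- the only index of range(n) with i == n-1 is the last one (none if the range is empty)
theorem pv_filter_last (n : Int) (hn : 0 ≤ n) :
    (PySem.List.pyRange 0 n 1).filter (fun i => decide (i = n - 1)) =
      if 0 < n then [n - 1] else [] := by
  by_cases h : 0 < n
  · have hsplit : PySem.List.pyRange 0 n 1 = PySem.List.pyRange 0 (n - 1) 1 ++ [n - 1] := by
      have := PySem.List.pyRange_one_succ_right (a := 0) (b := n - 1) (by omega)
      rw [show n - 1 + 1 = n by omega] at this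
      exact this
    rw [hsplit]
    simp only [List.filter_append]
    rw [List.filter_eq_nil_iff.mpr, if_pos h]
    · simp
    · intro a ha
      have := (PySem.List.mem_pyRange_one).mp ha
      simp; omega
  · rw [PySem.List.pyRange_one_eq_nil (by omega)]
    simp [h]

-- the multiples of s in range(n) are the first ceil(n/s) multiples of s
theorem pv_range_filter_mod (s : Nat) (hs : 0 < s) (n : Nat) :
    (List.range n).filter (fun k => decide (k % s = 0)) =
      (List.range ((n + s - 1) / s)).map (· * s) := by
  induction n with
  | zero => rw [Nat.div_eq_of_lt (by omega)]; simp
  | succ n ih =>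
    rw [List.range_succ, List.filter_append, ih,
      show n + 1 + s - 1 = n + s by omega]
    by_cases h : n % s = 0
    · obtain ⟨q, rfl⟩ := Nat.dvd_of_mod_eq_zero h
      have h1 : (s * q + s) / s = q + 1 := by
        rw [Nat.mul_add_div hs, Nat.div_self hs]
      have h2 : (s * q + s - 1) / s = q := by
        rw [show s * q + s - 1 = s * q + (s - 1) by omega, Nat.mul_add_div hs,
          Nat.div_eq_of_lt (by omega)]; omega
      simp [h, h1, h2, List.range_succ, Nat.mul_comm]
    · have hd : s * (n / s) + n % s = n := Nat.div_add_mod n s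
      have hms : n % s < s := Nat.mod_lt _ hs
      have h1 : (n + s) / s = n / s + 1 := by
        rw [show n + s = s * (n / s) + (n % s + s) by omega, Nat.mul_add_div hs,
          show (n % s + s) / s = 1 by
            rw [Nat.add_div_right _ hs, Nat.div_eq_of_lt (by omega)]]
      have h2 : (n + s - 1) / s = n / s + 1 := by
        rw [show n + s - 1 = s * (n / s) + (n % s + s - 1) by omega, Nat.mul_add_div hs,
          show (n % s + s - 1) / s = 1 by
            rw [show n % s + s - 1 = (n % s - 1) + s by omega, Nat.add_div_right _ hs,
              Nat.div_eq_of_lt (by omega)]]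
      simp [h, h1, h2]

-- A's sampled sublist (indices with i % s == 0) is exactly B's slice states[::s]
theorem pv_sampled_eq (states : List (List (String × String))) (s : Int) (hs : 0 < s) :
    ((PySem.List.pyRange 0 (states.length : Int) 1).filter
        (fun i => decide (PySem.Int.mod i s = 0))).map (fun i => PySem.List.pyGetD states i [])
      = (PySem.List.slice? states none none s).getD [] := by
  obtain ⟨s', rfl⟩ : ∃ s' : Nat, s = (s' : Int) := ⟨s.toNat, by omega⟩
  have hs' : 0 < s' := by exact_mod_cast hs
  set n := states.length with hn
  have hL : ((PySem.List.pyRange 0 (n : Int) 1).filter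
        (fun i => decide (PySem.Int.mod i (s' : Int) = 0))).map (fun i => PySem.List.pyGetD states i [])
      = (List.range ((n + s' - 1) / s')).map (fun k => states.getD (k * s') []) := by
    rw [PySem.List.pyRange_one]
    simp only [sub_zero, Int.toNat_natCast, zero_add, List.filter_map, List.map_map]
    have hfeq : ((fun i => decide (PySem.Int.mod i (s' : Int) = 0)) ∘ (fun k : Nat => (k : Int)))
        = fun k : Nat => decide (k % s' = 0) := by
      funext k
      simp [PySem.Int.mod_natCast, Int.natCast_dvd_natCast, Nat.dvd_iff_mod_eq_zero]
    rw [hfeq, pv_range_filter_mod s' hs']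
    simp [Function.comp_def, PySem.List.pyGetD_natCast]
  rw [hL]
  have hnez : ((s' : Int)) ≠ 0 := by exact_mod_cast hs.ne'
  have hnneg : ¬ ((s' : Int) < 0) := by omega
  simp only [PySem.List.slice?, PySem.List.sliceIndices, hnez, hnneg, if_pos hs, reduceIte]
  have hcount : (if 0 < (states.length : Int) then
        (((states.length : Int) - 0 + (s' : Int) - 1) / (s' : Int)).toNat else 0)
      = (n + s' - 1) / s' := by
    by_cases hn0 : 0 < n
    · rw [if_pos (by exact_mod_cast hn0),
        show ((states.length : Int) - 0 + (s' : Int) - 1) = ((n + s' - 1 : Nat) : Int) by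
          push_cast [← hn]; omega,
        ← Int.natCast_div, Int.toNat_natCast]
    · rw [if_neg (by omega), Nat.div_eq_of_lt (by omega)]
  rw [hcount, Option.getD_some]
  symm
  apply List.filterMap_eq_map_iff_forall_eq_some.mpr
  intro k hk
  rw [List.mem_range] at hk
  set M := (n + s' - 1) / s' with hM
  have hb : M * s' ≤ n + s' - 1 := Nat.div_mul_le_self _ _
  have hk1 : (k + 1) * s' ≤ M * s' := Nat.mul_le_mul_right _ hk
  have hk2 : (k + 1) * s' = k * s' + s' := by ring
  have hlt : k * s' < n := by omega
  have hidx : ((0 : Int) + (s' : Int) * (k : Int)).toNat = k * s' := by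
    rw [zero_add, ← Nat.cast_mul, Int.toNat_natCast, Nat.mul_comm]
  rw [hidx, List.getElem?_eq_getElem (by omega), List.getD_eq_getElem states [] (by omega)]

theorem pv_main_eq (states : List (List (String × String))) :
    state_to_string states = state_to_string_alt states := by
  unfold state_to_string state_to_string_alt
  simp only []
  set d : Int := (states.length : Int) with hd
  set s : Int := if d ≤ 15 then 2 else if d < 50 then 5 else 10 with hsdef
  have hs : 0 < s := by rw [hsdef]; split_ifs <;> norm_num
  rw [pv_loopA states s d (PySem.List.pyRange 0 d 1) (pvHeader s) [] 0]
  simp only [List.nil_append]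
  rw [Prod.mk.injEq]
  refine ⟨congrArg _ ?_, congrArg _ ?_⟩
  · -- output component
    rw [← pv_sampled_eq states s hs, ← List.flatMap_def, List.flatMap_map]
  · -- final_state component
    rw [pv_filter_last d (by positivity)]
    by_cases h0 : 0 < d
    · have hlen : 0 < states.length := by omega
      rw [if_pos h0]
      have hget : PySem.List.pyGetD states (d - 1) [] = states[states.length - 1] := by
        rw [PySem.List.pyGetD_eq_getElem states [] (by omega) (by omega)]
        congr 1
        omega
      have hlast : states.getLast? = some states[states.length - 1] := by
        rw [List.getLast?_eq_getElem?, List.getElem?_eq_getElem (by omega)]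
      rw [List.flatMap_cons, List.flatMap_nil, List.append_nil, hget, hlast]
    · have hlen : states = [] := List.length_eq_zero_iff.mp (by omega)
      rw [if_neg h0]
      subst hlen
      simp

-- ===== VERDICT (by name: the statement is the Claim_ definition above) =====
theorem state_to_string_spec : Claim_equal_state_to_string := by
  intro states _
  unfold Spec_state_to_string
  exact pv_main_eq states
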